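-- pv_equiv track=rewrite | github.com/robbert-harms/musical-games | scripts/convert_midi.py | clean_music_expr
-- ===== SOURCE A (Python) =====
-- def remove_comments(music_expr_line):
--     """Remove all comments from the given line of lilypond music expr
--
--     Args:
--         music_expr_line (str): a single line of a music expression.
--
--     Returns:
--         str: the music expression line without the comments
--     """
--     pos = music_expr_line.find('%')
--     if pos >= 0:
--         return music_expr_line[0:pos]
--     return music_expr_line
--
-- def remove_durations_in_chords(music_expr):
--     """Remove the absolute durations within chord signs: < and >
--
--     Args:
--         music_expr (str): the music expression
--
--     Returns:
--         str: the same music expression but with the durations removed from within chords.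
--     """
--     cleaned = ''
--
--     in_chord = False
--     in_timing = False
--
--     for char in music_expr:
--         if char == '<':
--             in_chord = True
--             cleaned += char
--         elif char == '>':
--             in_chord = False
--             in_timing = False
--             cleaned += char
--         else:
--             if not in_chord:
--                 cleaned += char
--             else: # in chord
--                 if in_timing:
--                     if char.isalpha() or char == ' ':
--                         in_timing = False
--                         cleaned += char
--                 else:
--                     if char.isdigit():
--                         in_timing = True
--                     else:
--                         cleaned += char
--     return cleaned
--
-- def clean_music_expr(music_expr):
--     """Clean the given music expression by removing all comments, bars, double spaces, tabs and new lines.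
--
--     Args:
--         music_expr (str): the music expression. Example: "a'8. cis''16 e'' a'' gis'' b'' e'8 cis' | % 2"
--
--     Returns:
--         str: the music expression without all redundant information.
--     """
--     cleaned = ''
--
--     for line in music_expr.split('\n'):
--         cleaned += remove_comments(line)
--
--     cleaned = cleaned.replace('|', '')
--     cleaned = cleaned.replace('\t', '')
--     cleaned = remove_durations_in_chords(cleaned)
--
--     while cleaned.find('  ') >= 0:
--         cleaned = cleaned.replace('  ', ' ')
--
--     return cleaned.strip()
-- ===== SOURCE B (Python) =====
-- def _emit(out, prev_space, ch):
--     """Append ch to out, collapsing runs of spaces; return the new prev_space flag."""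
--     if ch == ' ':
--         if prev_space:
--             return True
--         out.append(' ')
--         return True
--     out.append(ch)
--     return False
--
-- def clean_music_expr(music_expr):
--     """Single-pass state machine: comment, chord and space-collapse states in one scan."""
--     out = []
--     in_comment = False
--     in_chord = False
--     in_timing = False
--     prev_space = False
--     for ch in music_expr:
--         if in_comment:
--             if ch == '\n':
--                 in_comment = False
--         elif ch == '%':
--             in_comment = True
--         elif ch == '\n' or ch == '|' or ch == '\t':
--             pass
--         elif ch == '<':
--             in_chord = True
--             prev_space = _emit(out, prev_space, ch)
--         elif ch == '>':
--             in_chord = False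
--             in_timing = False
--             prev_space = _emit(out, prev_space, ch)
--         elif not in_chord:
--             prev_space = _emit(out, prev_space, ch)
--         elif in_timing:
--             if ch.isalpha() or ch == ' ':
--                 in_timing = False
--                 prev_space = _emit(out, prev_space, ch)
--         else:
--             if ch.isdigit():
--                 in_timing = True
--             else:
--                 prev_space = _emit(out, prev_space, ch)
--     return ''.join(out).strip()
-- ===== Notes on version B (the rewrite author's own statement) =====
-- stated objective: alternative
-- what changed: Replaced A's five-pass pipeline (per-line comment strip via split/find/slice, two str.replace passes for '|' and tab, a separate chord-duration FSM, and a repeated ' '->' ' replace loop) with one single-pass state machine over the original string that tracks comment, chord, timing and previous-space states.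
import Mathlib
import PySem

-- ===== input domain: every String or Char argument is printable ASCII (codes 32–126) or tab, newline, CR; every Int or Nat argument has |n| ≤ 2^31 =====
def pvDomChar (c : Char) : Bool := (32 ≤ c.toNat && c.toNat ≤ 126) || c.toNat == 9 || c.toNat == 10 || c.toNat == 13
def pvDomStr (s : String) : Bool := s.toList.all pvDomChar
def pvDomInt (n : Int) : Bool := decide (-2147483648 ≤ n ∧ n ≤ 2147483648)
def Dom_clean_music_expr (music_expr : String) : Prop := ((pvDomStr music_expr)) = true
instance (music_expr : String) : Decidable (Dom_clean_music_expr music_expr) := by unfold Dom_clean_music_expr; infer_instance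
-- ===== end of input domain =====

-- B replaces A's five passes (per-line comment strip, two replace passes, the chord FSM,
-- the repeated '  '→' ' replace loop) by ONE state machine over the original string; objective: alternative.

-- ===== PORT A =====
-- helpers needed by the port's termination proof (squeezeLoopA cites them in decreasing_by):
-- one left-to-right nonoverlapping pass of '  ' -> ' ' (the effect of one str.replace call)
def squeezeOnce : List Char → List Char
  | [] => []
  | [c] => [c]
  | c :: d :: t =>
    if c = ' ' ∧ d = ' ' then ' ' :: squeezeOnce t else c :: squeezeOnce (d :: t)

-- whether the list contains two adjacent spaces
def hasDbl : List Char → Bool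
  | [] => false
  | [_] => false
  | c :: d :: t => (c == ' ' && d == ' ') || hasDbl (d :: t)

theorem replace_go_twospace (fuel : Nat) (l acc : List Char) (h : l.length ≤ fuel) :
    PySem.Chars.replace.go [' ', ' '] [' '] fuel l acc = acc.reverse ++ squeezeOnce l := by
  induction fuel generalizing l acc with
  | zero =>
    have : l = [] := List.eq_nil_of_length_eq_zero (Nat.le_zero.mp h)
    subst this; simp [PySem.Chars.replace.go, squeezeOnce]
  | succ fuel ih =>
    match l with
    | [] => simp [PySem.Chars.replace.go, squeezeOnce]
    | [c] =>
      have hpre : List.isPrefixOf [' ', ' '] [c] = false := by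
        simp [List.isPrefixOf]
      rw [PySem.Chars.replace.go]
      simp only [hpre, if_neg Bool.false_ne_true]
      rw [ih [] (c :: acc) (by simp)]
      simp [squeezeOnce]
    | c :: d :: t =>
      rw [PySem.Chars.replace.go]
      by_cases hcd : c = ' ' ∧ d = ' '
      · obtain ⟨hc, hd⟩ := hcd
        subst hc; subst hd
        have hpre : List.isPrefixOf [' ', ' '] (' ' :: ' ' :: t) = true := by
          simp [List.isPrefixOf]
        simp only [hpre, if_pos rfl]
        rw [show List.drop [' ', ' '].length (' ' :: ' ' :: t) = t from rfl]
        rw [ih t ([' '].reverse ++ acc) (by simp only [List.length_cons] at h ⊢; omega)]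
        simp [squeezeOnce]
      · have hpre : List.isPrefixOf [' ', ' '] (c :: d :: t) = false := by
          simp [List.isPrefixOf]
          exact fun h1 h2 => absurd ⟨h1.symm, h2.symm⟩ hcd
        simp only [hpre, if_neg Bool.false_ne_true]
        rw [ih (d :: t) (c :: acc) (by simp only [List.length_cons] at h ⊢; omega)]
        simp [squeezeOnce, if_neg hcd]

theorem replace_twospace (cs : List Char) :
    PySem.Chars.replace cs [' ', ' '] [' '] = squeezeOnce cs := by
  rw [PySem.Chars.replace]
  simp [replace_go_twospace cs.length cs [] le_rfl]

theorem infix_iff_hasDbl (cs : List Char) : [' ', ' '] <:+: cs ↔ hasDbl cs = true := by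
  fun_induction hasDbl cs with
  | case1 => simp [hasDbl]
  | case2 c =>
    simp [hasDbl]
    intro h
    have := h.length_le
    simp at this
  | case3 c d t ih =>
    rw [List.infix_cons_iff]
    constructor
    · rintro (hp | hi)
      · rw [List.cons_prefix_cons] at hp
        obtain ⟨h1, hp⟩ := hp
        rw [List.cons_prefix_cons] at hp
        simp [h1.symm, hp.1.symm]
      · simp [ih.mp hi]
    · intro h
      simp at h
      rcases h with ⟨h1, h2⟩ | h2
      · left
        rw [List.cons_prefix_cons, List.cons_prefix_cons]
        exact ⟨h1.symm, h2.symm, List.nil_prefix⟩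
      · exact Or.inr (ih.mpr h2)

theorem squeezeOnce_length_le (cs : List Char) : (squeezeOnce cs).length ≤ cs.length := by
  fun_induction squeezeOnce cs <;> simp_all <;> omega

theorem squeezeOnce_length_lt (cs : List Char) (h : hasDbl cs = true) :
    (squeezeOnce cs).length < cs.length := by
  fun_induction squeezeOnce cs with
  | case1 => simp [hasDbl] at h
  | case2 c => simp [hasDbl] at h
  | case3 c d t hcd ih =>
    have := squeezeOnce_length_le t; simp; omega
  | case4 c d t hcd ih =>
    have hd : hasDbl (d :: t) = true := by
      simp [hasDbl] at h
      rcases h with ⟨h1, h2⟩ | h2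
      · exact absurd ⟨h1, h2⟩ hcd
      · exact h2
    have := ih hd; simp at this ⊢; omega

theorem replace_twospace_len (cs : List Char) (h : 0 ≤ PySem.Chars.find cs [' ', ' ']) :
    (PySem.Chars.replace cs [' ', ' '] [' ']).length < cs.length := by
  rw [replace_twospace]
  exact squeezeOnce_length_lt cs ((infix_iff_hasDbl cs).mp ((PySem.Chars.find_nonneg_iff cs [' ', ' ']).mp h))

-- remove_comments, transliterated
def rcA (line : List Char) : List Char :=
  let pos := PySem.Chars.find line ['%']
  if 0 ≤ pos then PySem.Chars.slice line (some 0) (some pos) else line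

-- one step of the for-loop of remove_durations_in_chords: state (cleaned, in_chord, in_timing)
def chordStep (st : List Char × Bool × Bool) (c : Char) : List Char × Bool × Bool :=
  let (cleaned, in_chord, in_timing) := st
  if c = '<' then (cleaned ++ [c], true, in_timing)
  else if c = '>' then (cleaned ++ [c], false, false)
  else if ¬ in_chord then (cleaned ++ [c], in_chord, in_timing)
  else if in_timing then
    if PySem.Chars.isalpha c || c = ' ' then (cleaned ++ [c], in_chord, false)
    else (cleaned, in_chord, in_timing)
  else
    if PySem.Chars.isdigit c then (cleaned, in_chord, true)
    else (cleaned ++ [c], in_chord, in_timing)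

-- the while-loop: while cleaned.find('  ') >= 0: cleaned = cleaned.replace('  ', ' ')
def squeezeLoopA (cs : List Char) : List Char :=
  if h : 0 ≤ PySem.Chars.find cs [' ', ' '] then
    squeezeLoopA (PySem.Chars.replace cs [' ', ' '] [' '])
  else cs
termination_by cs.length
decreasing_by exact replace_twospace_len cs h

def clean_music_expr (music_expr : String) : String :=
  String.mk (PySem.Chars.strip (squeezeLoopA
    ((List.foldl chordStep (([] : List Char), false, false)
      (PySem.Chars.replace
        (PySem.Chars.replace
          (List.foldl (fun acc line => acc ++ rcA line) []
            (PySem.Chars.splitOn music_expr.toList ['\n']))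
          ['|'] [])
        ['\t'] [])).1)))

-- ===== PORT B =====
def bEmit (out : List Char) (prev_space : Bool) (ch : Char) : List Char × Bool :=
  if ch = ' ' then
    if prev_space then (out, true) else (out ++ [' '], true)
  else (out ++ [ch], false)

def bLoop : Bool → Bool → Bool → Bool → List Char → List Char → List Char
  | _, _, _, _, out, [] => out
  | in_comment, in_chord, in_timing, prev_space, out, ch :: rest =>
    if in_comment then
      if ch = '\n' then bLoop false in_chord in_timing prev_space out rest
      else bLoop true in_chord in_timing prev_space out rest
    else if ch = '%' then bLoop true in_chord in_timing prev_space out rest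
    else if ch = '\n' ∨ ch = '|' ∨ ch = '\t' then
      bLoop in_comment in_chord in_timing prev_space out rest
    else if ch = '<' then
      let (o, p) := bEmit out prev_space ch
      bLoop in_comment true in_timing p o rest
    else if ch = '>' then
      let (o, p) := bEmit out prev_space ch
      bLoop in_comment false false p o rest
    else if ¬ in_chord then
      let (o, p) := bEmit out prev_space ch
      bLoop in_comment in_chord in_timing p o rest
    else if in_timing then
      if PySem.Chars.isalpha ch || ch = ' ' then
        let (o, p) := bEmit out prev_space ch
        bLoop in_comment in_chord false p o rest
      else bLoop in_comment in_chord in_timing prev_space out rest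
    else
      if PySem.Chars.isdigit ch then bLoop in_comment in_chord true prev_space out rest
      else
        let (o, p) := bEmit out prev_space ch
        bLoop in_comment in_chord in_timing p o rest

def clean_music_expr_alt (music_expr : String) : String :=
  String.mk (PySem.Chars.strip (bLoop false false false false [] music_expr.toList))

-- ===== PRECONDITION & SPEC =====
def Spec_clean_music_expr (music_expr : String) (out : String) : Prop := out = clean_music_expr_alt music_expr
instance (music_expr : String) (out : String) : Decidable (Spec_clean_music_expr music_expr out) := by unfold Spec_clean_music_expr; infer_instance

-- ===== CLAIM (what is proved, stated in full; the proofs are below) =====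
def Claim_equal_clean_music_expr : Prop := ∀ (music_expr : String), Dom_clean_music_expr music_expr → Spec_clean_music_expr music_expr (clean_music_expr music_expr)

-- ===== LEMMAS AND PROOFS =====
-- proof-side middle ground: the pipeline both ports compute, as simple structural recursions

def tw (l : List Char) : List Char := l.takeWhile (fun c => !(c == '%'))

def dcGo : Bool → List Char → List Char
  | _, [] => []
  | ic, c :: t =>
    if c = '\n' then dcGo false t
    else if ic then dcGo true t
    else if c = '%' then dcGo true t
    else c :: dcGo false t

def consHead (p : List Char) : List (List Char) → List (List Char)
  | [] => [p]
  | x :: xs => (p ++ x) :: xs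

def splitNL : List Char → List (List Char)
  | [] => [[]]
  | c :: t => if c = '\n' then [] :: splitNL t else consHead [c] (splitNL t)

def chordGo : Bool → Bool → List Char → List Char
  | _, _, [] => []
  | ich, itm, c :: t =>
    if c = '<' then c :: chordGo true itm t
    else if c = '>' then c :: chordGo false false t
    else if ¬ ich then c :: chordGo ich itm t
    else if itm then
      if PySem.Chars.isalpha c || c = ' ' then c :: chordGo ich false t else chordGo ich itm t
    else
      if PySem.Chars.isdigit c then chordGo ich true t else c :: chordGo ich itm t

def sqz : Bool → List Char → List Char
  | _, [] => []
  | b, c :: t => if c = ' ' then (if b then sqz true t else ' ' :: sqz true t) else c :: sqz false t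

def fBar (l : List Char) : List Char := l.filter (fun c => !(c == '|'))
def fTab (l : List Char) : List Char := l.filter (fun c => !(c == '\t'))

theorem find_go_pct (l : List Char) (k : Nat) :
    PySem.Chars.find.go ['%'] l k =
      if '%' ∈ l then ((k + (tw l).length : Nat) : Int) else -1 := by
  induction l generalizing k with
  | nil => simp [PySem.Chars.find.go]
  | cons c t ih =>
    rw [PySem.Chars.find.go]
    by_cases hc : c = '%'
    · subst hc
      simp [List.isPrefixOf, tw]
    · have hpre : List.isPrefixOf ['%'] (c :: t) = false := by
        simp [List.isPrefixOf]; exact fun h => absurd h.symm hc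
      simp only [hpre, if_neg Bool.false_ne_true, ih]
      by_cases hm : '%' ∈ t
      · simp [hm, hc, tw, List.takeWhile_cons]
        push_cast; omega
      · simp [hm, hc]
        exact fun h => absurd h.symm hc

theorem rcA_eq_tw (l : List Char) : rcA l = tw l := by
  show (if 0 ≤ PySem.Chars.find l ['%'] then PySem.Chars.slice l (some 0) (some (PySem.Chars.find l ['%'])) else l) = tw l
  show (if 0 ≤ PySem.Chars.find l ['%'] then PySem.Chars.slice l (some 0) (some (PySem.Chars.find l ['%'])) else l) = tw l
  rw [PySem.Chars.find, find_go_pct]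
  by_cases hm : '%' ∈ l
  · simp only [if_pos hm, Nat.zero_add]
    rw [if_pos (Int.natCast_nonneg _)]
    rw [PySem.Chars.slice_eq_listSlice]
    rw [show (some (0:Int)) = (some ((0:Nat):Int)) from rfl, PySem.List.slice_natCast]
    simp
    exact (List.prefix_iff_eq_take.mp (List.takeWhile_prefix _)).symm
  · simp only [if_neg hm]
    rw [if_neg (by norm_num)]
    exact (List.takeWhile_eq_self_iff.mpr (by intro x hx; simp; intro hxe; exact hm (hxe ▸ hx))).symm

theorem consHead_consHead (p c : List Char) (ls : List (List Char)) :
    consHead p (consHead c ls) = consHead (p ++ c) ls := by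
  cases ls <;> simp [consHead]

theorem splitNL_ne_nil (l : List Char) : splitNL l ≠ [] := by
  fun_induction splitNL l with
  | case1 => simp
  | case2 => simp
  | case3 c t hc ih => cases h : splitNL t <;> simp [consHead]

theorem splitOn_go_eq (fuel : Nat) (l cur : List Char) (acc : List (List Char))
    (h : l.length ≤ fuel) :
    PySem.Chars.splitOn.go ['\n'] fuel l cur acc =
      acc.reverse ++ consHead cur.reverse (splitNL l) := by
  induction fuel generalizing l cur acc with
  | zero =>
    have : l = [] := List.eq_nil_of_length_eq_zero (Nat.le_zero.mp h)
    subst this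
    simp [PySem.Chars.splitOn.go, splitNL, consHead]
  | succ fuel ih =>
    match l with
    | [] => simp [PySem.Chars.splitOn.go, splitNL, consHead]
    | c :: t =>
      rw [PySem.Chars.splitOn.go]
      by_cases hc : c = '\n'
      · subst hc
        have hpre : List.isPrefixOf ['\n'] ('\n' :: t) = true := by simp [List.isPrefixOf]
        simp only [hpre, if_pos rfl]
        rw [show List.drop ['\n'].length ('\n' :: t) = t from rfl]
        rw [ih t [] (cur.reverse :: acc) (by simp only [List.length_cons] at h ⊢; omega)]
        simp [splitNL, consHead]
        cases hs : splitNL t with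
        | nil => exact absurd hs (splitNL_ne_nil t)
        | cons x xs => simp [consHead]
      · have hpre : List.isPrefixOf ['\n'] (c :: t) = false := by
          simp [List.isPrefixOf]; exact fun h => absurd h.symm hc
        simp only [hpre, if_neg Bool.false_ne_true]
        rw [ih t (c :: cur) acc (by simp only [List.length_cons] at h ⊢; omega)]
        rw [show splitNL (c :: t) = consHead [c] (splitNL t) from by simp [splitNL, hc]]
        rw [consHead_consHead]
        simp

theorem splitOn_eq_splitNL (l : List Char) :
    PySem.Chars.splitOn l ['\n'] = splitNL l := by
  rw [PySem.Chars.splitOn, splitOn_go_eq (l.length + 1) l [] [] (by omega)]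
  cases h : splitNL l with
  | nil => exact absurd h (splitNL_ne_nil l)
  | cons x xs => simp [consHead]

theorem flatMap_tw_splitNL (s : List Char) :
    (splitNL s).flatMap tw = dcGo false s ∧ ((splitNL s).tail).flatMap tw = dcGo true s := by
  induction s with
  | nil => simp [splitNL, dcGo, tw]
  | cons c t ih =>
    obtain ⟨ihP, ihQ⟩ := ih
    by_cases hc : c = '\n'
    · subst hc
      simp [splitNL, dcGo, tw, ihP]
    · rw [show splitNL (c :: t) = consHead [c] (splitNL t) from by simp [splitNL, hc]]
      cases hs : splitNL t with
      | nil => exact absurd hs (splitNL_ne_nil t)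
      | cons hd tl =>
        rw [hs] at ihP ihQ
        by_cases hp : c = '%'
        · subst hp
          constructor
          · simp [consHead, tw, dcGo] at ihQ ⊢
            exact ihQ
          · simp [consHead] at ihQ ⊢
            exact ihQ
        · constructor
          · simp [consHead, dcGo, hc, hp]
            simp [List.flatMap_cons] at ihP ⊢
            rw [show tw (c :: hd) = c :: tw hd from by simp [tw, List.takeWhile_cons, hp]]
            simp [ihP]
          · simp [consHead, dcGo, hc, hp] at ihQ ⊢
            exact ihQ

theorem comment_stage (s : List Char) :
    List.foldl (fun acc line => acc ++ rcA line) [] (PySem.Chars.splitOn s ['\n']) = dcGo false s := by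
  have hf : (fun (acc : List Char) line => acc ++ rcA line) = (fun acc line => acc ++ tw line) := by
    funext a l; rw [rcA_eq_tw]
  rw [hf, PySem.List.foldl_append_eq_flatMap, splitOn_eq_splitNL]
  simpa using (flatMap_tw_splitNL s).1

theorem replace_go_single (c₀ : Char) (fuel : Nat) (l acc : List Char) (h : l.length ≤ fuel) :
    PySem.Chars.replace.go [c₀] [] fuel l acc = acc.reverse ++ l.filter (fun c => !(c == c₀)) := by
  induction fuel generalizing l acc with
  | zero =>
    have : l = [] := List.eq_nil_of_length_eq_zero (Nat.le_zero.mp h)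
    subst this; simp [PySem.Chars.replace.go]
  | succ fuel ih =>
    match l with
    | [] => simp [PySem.Chars.replace.go]
    | c :: t =>
      rw [PySem.Chars.replace.go]
      by_cases hc : c = c₀
      · subst hc
        have hpre : List.isPrefixOf [c] (c :: t) = true := by simp [List.isPrefixOf]
        simp only [hpre, if_pos rfl]
        rw [show List.drop [c].length (c :: t) = t from rfl]
        rw [ih t ([].reverse ++ acc) (by simp only [List.length_cons] at h ⊢; omega)]
        simp
      · have hpre : List.isPrefixOf [c₀] (c :: t) = false := by
          simp [List.isPrefixOf]; exact fun h => absurd h.symm hc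
        simp only [hpre, if_neg Bool.false_ne_true]
        rw [ih t (c :: acc) (by simp only [List.length_cons] at h ⊢; omega)]
        simp [List.filter_cons, hc]

theorem replace_single (c₀ : Char) (l : List Char) :
    PySem.Chars.replace l [c₀] [] = l.filter (fun c => !(c == c₀)) := by
  rw [PySem.Chars.replace]
  simp [replace_go_single c₀ l.length l [] le_rfl]

theorem sqz_squeezeOnce (cs : List Char) (b : Bool) : sqz b (squeezeOnce cs) = sqz b cs := by
  fun_induction squeezeOnce cs generalizing b with
  | case1 => rfl
  | case2 c => rfl
  | case3 c d t hcd ih =>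
    obtain ⟨hc, hd⟩ := hcd; subst hc; subst hd
    cases b <;> simp [sqz, ih]
  | case4 c d t hcd ih =>
    by_cases hc : c = ' '
    · subst hc
      cases b <;> simp [sqz, ih]
    · cases b <;> simp [sqz, hc, ih]

theorem sqz_of_noDbl (cs : List Char) (h : hasDbl cs = false) : sqz false cs = cs := by
  fun_induction hasDbl cs with
  | case1 => rfl
  | case2 c => by_cases hc : c = ' ' <;> simp [sqz, hc]
  | case3 c d t ih =>
    simp [hasDbl] at h
    obtain ⟨h1, h2⟩ := h
    have ihr := ih h2
    by_cases hc : c = ' '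
    · subst hc
      have hd : ¬ d = ' ' := by intro hd; exact h1 rfl (by simpa using hd)
      rw [show sqz false (' ' :: d :: t) = ' ' :: sqz true (d :: t) from by simp [sqz]]
      rw [show sqz true (d :: t) = d :: sqz false t from by simp [sqz, hd]]
      rw [show sqz false (d :: t) = d :: sqz false t from by simp [sqz, hd]] at ihr
      have : sqz false t = t := by injection ihr
      rw [this]
    · rw [show sqz false (c :: d :: t) = c :: sqz false (d :: t) from by simp [sqz, hc], ihr]

theorem chord_fold (s : List Char) (acc : List Char) (ich itm : Bool) :
    (List.foldl chordStep (acc, ich, itm) s).1 = acc ++ chordGo ich itm s := by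
  induction s generalizing acc ich itm with
  | nil => simp [chordGo]
  | cons c t ih =>
    rw [List.foldl_cons]
    rw [show chordGo ich itm (c :: t) =
      (if c = '<' then c :: chordGo true itm t
      else if c = '>' then c :: chordGo false false t
      else if ¬ ich then c :: chordGo ich itm t
      else if itm then
        if PySem.Chars.isalpha c || c = ' ' then c :: chordGo ich false t else chordGo ich itm t
      else
        if PySem.Chars.isdigit c then chordGo ich true t else c :: chordGo ich itm t) from rfl]
    split_ifs with h1 h2 h3 h4 h5 h6
    · rw [show chordStep (acc, ich, itm) c = (acc ++ [c], true, itm) from by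
        simp [chordStep, h1]]
      simp [ih]
    · rw [show chordStep (acc, ich, itm) c = (acc ++ [c], false, false) from by
        simp [chordStep, h1, h2]]
      simp [ih]
    · rw [show chordStep (acc, ich, itm) c = (acc ++ [c], ich, false) from by
        simp [chordStep, h1, h2, h3, h4, h5]]
      simp [ih]
    · rw [show chordStep (acc, ich, itm) c = (acc, ich, itm) from by
        simp [chordStep, h1, h2, h3, h4, h5]]
      simp [ih]
    · rw [show chordStep (acc, ich, itm) c = (acc, ich, true) from by
        simp [chordStep, h1, h2, h3, h4, h6]]
      simp [ih]
    · rw [show chordStep (acc, ich, itm) c = (acc ++ [c], ich, itm) from by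
        simp [chordStep, h1, h2, h3, h4, h6]]
      simp [ih]
    · rw [show chordStep (acc, ich, itm) c = (acc ++ [c], ich, itm) from by
        simp [chordStep, h1, h2, h3]]
      simp [ih]

theorem squeezeLoopA_eq_sq (cs : List Char) : squeezeLoopA cs = sqz false cs := by
  fun_induction squeezeLoopA cs with
  | case1 cs h ih =>
    rw [ih, replace_twospace, sqz_squeezeOnce]
  | case2 cs h =>
    refine (sqz_of_noDbl cs ?_).symm
    rcases hd : hasDbl cs with _ | _
    · rfl
    · exact absurd ((PySem.Chars.find_nonneg_iff cs [' ', ' ']).mpr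
        ((infix_iff_hasDbl cs).mpr hd)) h

theorem emit_sqz (out : List Char) (psp : Bool) (ch : Char) (X : List Char) :
    (bEmit out psp ch).1 ++ sqz (bEmit out psp ch).2 X = out ++ sqz psp (ch :: X) := by
  by_cases hc : ch = ' '
  · subst hc; cases psp <;> simp [bEmit, sqz]
  · simp [bEmit, hc, sqz]

theorem bLoop_fused (s : List Char) (icm ich itm psp : Bool) (out : List Char) :
    bLoop icm ich itm psp out s =
      out ++ sqz psp (chordGo ich itm (fTab (fBar (dcGo icm s)))) := by
  induction s generalizing icm ich itm psp out with
  | nil => simp [bLoop, dcGo, fTab, fBar, chordGo, sqz]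
  | cons ch rest ih =>
    rw [bLoop]
    cases icm with
    | true =>
      by_cases hnl : ch = '\n'
      · subst hnl; simp [dcGo, ih]
      · simp [hnl, dcGo, ih]
    | false =>
      by_cases hpc : ch = '%'
      · subst hpc
        simp [dcGo, ih]
      · by_cases hnl : ch = '\n'
        · subst hnl; simp [dcGo, ih]
        · by_cases hbar : ch = '|'
          · subst hbar; simp [dcGo, fBar, ih]
          · by_cases htab : ch = '\t'
            · subst htab; simp [dcGo, fBar, fTab, ih]
            · have hdc : dcGo false (ch :: rest) = ch :: dcGo false rest := by
                simp [dcGo, hnl, hpc]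
              have hfil : fTab (fBar (ch :: dcGo false rest)) =
                  ch :: fTab (fBar (dcGo false rest)) := by
                simp [fBar, fTab, hbar, htab]
              by_cases hlt : ch = '<'
              · subst hlt
                rcases hbe : bEmit out psp '<' with ⟨o, p⟩
                simp only [hdc, hfil, ih, hbe, chordGo, sqz]
                have := emit_sqz out psp '<' (chordGo true itm (fTab (fBar (dcGo false rest))))
                rw [hbe] at this
                simp at this ⊢
                simp [this, chordGo]
              · by_cases hgt : ch = '>'
                · subst hgt
                  rcases hbe : bEmit out psp '>' with ⟨o, p⟩
                  simp only [hdc, hfil, ih, hbe, chordGo, sqz]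
                  have := emit_sqz out psp '>' (chordGo false false (fTab (fBar (dcGo false rest))))
                  rw [hbe] at this
                  simp at this ⊢
                  simp [this, chordGo, hlt]
                · cases ich with
                  | false =>
                    rcases hbe : bEmit out psp ch with ⟨o, p⟩
                    simp only [hnl, hbar, htab, hlt, hgt, if_neg, hbe]
                    have hcg : chordGo false itm (ch :: fTab (fBar (dcGo false rest))) =
                        ch :: chordGo false itm (fTab (fBar (dcGo false rest))) := by
                      simp [chordGo, hlt, hgt]
                    have := emit_sqz out psp ch (chordGo false itm (fTab (fBar (dcGo false rest))))
                    rw [hbe] at this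
                    simp [hdc, hfil, hcg, ih, this, hpc, hnl, hbar, htab, hlt, hgt]
                  | true =>
                    cases itm with
                    | true =>
                      by_cases hal : (PySem.Chars.isalpha ch || ch = ' ') = true
                      · rcases hbe : bEmit out psp ch with ⟨o, p⟩
                        have hcg : chordGo true true (ch :: fTab (fBar (dcGo false rest))) =
                            ch :: chordGo true false (fTab (fBar (dcGo false rest))) := by
                          simp [chordGo, hlt, hgt, hal]
                        have := emit_sqz out psp ch (chordGo true false (fTab (fBar (dcGo false rest))))
                        rw [hbe] at this
                        simp [hal, hbe, hdc, hfil, hcg, ih, this, hnl, hpc, hbar, htab, hlt, hgt]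
                      · have hcg : chordGo true true (ch :: fTab (fBar (dcGo false rest))) =
                            chordGo true true (fTab (fBar (dcGo false rest))) := by
                          simp [chordGo, hlt, hgt, hal]
                        simp [hal, hdc, hfil, hcg, ih, hnl, hpc, hbar, htab, hlt, hgt]
                    | false =>
                      by_cases hdg : PySem.Chars.isdigit ch = true
                      · have hcg : chordGo true false (ch :: fTab (fBar (dcGo false rest))) =
                            chordGo true true (fTab (fBar (dcGo false rest))) := by
                          simp [chordGo, hlt, hgt, hdg]
                        simp [hdg, hdc, hfil, hcg, ih, hnl, hpc, hbar, htab, hlt, hgt]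
                      · rcases hbe : bEmit out psp ch with ⟨o, p⟩
                        have hcg : chordGo true false (ch :: fTab (fBar (dcGo false rest))) =
                            ch :: chordGo true false (fTab (fBar (dcGo false rest))) := by
                          simp [chordGo, hlt, hgt, hdg]
                        have := emit_sqz out psp ch (chordGo true false (fTab (fBar (dcGo false rest))))
                        rw [hbe] at this
                        simp [hdg, hbe, hdc, hfil, hcg, ih, this, hnl, hpc, hbar, htab, hlt, hgt]

-- ===== VERDICT (by name: the statement is the Claim_ definition above) =====
theorem clean_music_expr_spec : Claim_equal_clean_music_expr := by
  intro s _
  unfold Spec_clean_music_expr clean_music_expr clean_music_expr_alt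
  rw [comment_stage, replace_single, replace_single, chord_fold, squeezeLoopA_eq_sq,
      bLoop_fused]
  rfl
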